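-- pv_equiv track=rewrite | github.com/ArturMosk/Python_Basic-Skillbox- | Module18/09_message/main.py | reverse_and_output_word
-- ===== SOURCE A (Python) =====
-- def reverse_and_output_word(word):
--     if word.isalpha():
--         return word[::-1]
--
--     word_reversed_lst = []
--     i_start = 0
--     for index in range(len(word)):
--         if not word[index].isalpha():
--             word_tmp = word[i_start: index]
--             word_reversed_lst.append(word_tmp[::-1] + word[index])
--             i_start = index + 1
--         if index == len(word) - 1:
--             word_tmp = word[i_start:]
--             word_reversed_lst.append(word_tmp[::-1])
--     word_reversed = ''.join(word_reversed_lst)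
--
--     return word_reversed
-- ===== SOURCE B (Python) =====
-- def reverse_and_output_word(word):
--     out = []
--     run = []
--     for ch in word:
--         if ch.isalpha():
--             run.append(ch)
--         else:
--             out.extend(reversed(run))
--             out.append(ch)
--             run = []
--     out.extend(reversed(run))
--     return ''.join(out)
-- ===== Notes on version B (the rewrite author's own statement) =====
-- stated objective: simpler
-- what changed: Replaces A's isalpha fast path plus index loop with slice bookkeeping (i_start, word[i_start:index][::-1], a last-index special case) by a single character-level pass that accumulates the current alphabetic run and flushes it reversed at each non-letter and at the end.
import Mathlib
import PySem

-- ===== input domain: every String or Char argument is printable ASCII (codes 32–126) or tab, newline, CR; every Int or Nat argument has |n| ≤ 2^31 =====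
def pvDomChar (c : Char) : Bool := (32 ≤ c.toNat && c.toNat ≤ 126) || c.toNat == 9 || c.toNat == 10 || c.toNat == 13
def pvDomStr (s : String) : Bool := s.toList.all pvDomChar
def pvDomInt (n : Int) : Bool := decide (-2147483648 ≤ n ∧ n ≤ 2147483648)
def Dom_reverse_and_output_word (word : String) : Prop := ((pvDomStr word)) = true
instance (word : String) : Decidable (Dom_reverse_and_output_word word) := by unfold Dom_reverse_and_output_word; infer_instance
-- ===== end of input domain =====

-- B replaces A's index loop with slice bookkeeping by a single char-level pass that
-- accumulates the current alphabetic run and flushes it reversed (objective: simpler).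

-- ===== PORT A =====
-- one iteration of A's 'for index in range(len(word))' loop; state = (word_reversed_lst, i_start)
def pvAStep (cs : List Char) (n : Nat) (st : List (List Char) × Nat) (index : Nat) :
    List (List Char) × Nat :=
  let st1 :=
    if !PySem.Chars.isalpha (cs.getD index ' ') then   -- if not word[index].isalpha()
      -- word_tmp = word[i_start:index]; append(word_tmp[::-1] + word[index]); i_start = index+1
      (st.1 ++ [(PySem.List.slice cs (some (st.2 : Int)) (some (index : Int))).reverse
                  ++ [cs.getD index ' ']], index + 1)
    else st
  if index = n - 1 then                                 -- if index == len(word) - 1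
    -- word_tmp = word[i_start:]; append(word_tmp[::-1])
    (st1.1 ++ [(PySem.List.slice cs (some (st1.2 : Int)) none).reverse], st1.2)
  else st1

def reverse_and_output_word (word : String) : String :=
  if PySem.Str.strIsalpha word then
    String.ofList word.toList.reverse                   -- word[::-1] (slice?_none_none_neg_one)
  else
    let cs := word.toList
    let st := (List.range cs.length).foldl (pvAStep cs cs.length) ([], 0)
    String.ofList st.1.flatten                          -- ''.join(word_reversed_lst)

-- ===== PORT B =====
-- one iteration of B's 'for ch in word' loop; state = (out, run)
def pvBStep (st : List Char × List Char) (ch : Char) : List Char × List Char :=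
  if PySem.Chars.isalpha ch then (st.1, st.2 ++ [ch])   -- run.append(ch)
  else (st.1 ++ st.2.reverse ++ [ch], [])               -- out.extend(reversed(run)); out.append(ch)

def reverse_and_output_word_alt (word : String) : String :=
  let st := word.toList.foldl pvBStep ([], [])
  String.ofList (st.1 ++ st.2.reverse)                  -- out.extend(reversed(run)); ''.join(out)

-- ===== PRECONDITION & SPEC =====
def Spec_reverse_and_output_word (word : String) (out : String) : Prop := out = reverse_and_output_word_alt word
instance (word : String) (out : String) : Decidable (Spec_reverse_and_output_word word out) := by unfold Spec_reverse_and_output_word; infer_instance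

-- ===== CLAIM (what is proved, stated in full; the proofs are below) =====
def Claim_equal_reverse_and_output_word : Prop := ∀ (word : String), Dom_reverse_and_output_word word → Spec_reverse_and_output_word word (reverse_and_output_word word)

-- ===== LEMMAS AND PROOFS =====

-- loop invariant tying A's state (lst, i_start) after k iterations to B's (out, run):
-- flatten lst = out, run is the slice of cs from i_start to k, and i_start + |run| = k.
theorem pv_inv (cs : List Char) (k : Nat) (hk : k ≤ cs.length - 1) :
    ((List.range k).foldl (pvAStep cs cs.length) ([], 0)).1.flatten
        = ((cs.take k).foldl pvBStep ([], [])).1 ∧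
    ((cs.take k).foldl pvBStep ([], [])).2
        = (cs.take k).drop ((List.range k).foldl (pvAStep cs cs.length) ([], 0)).2 ∧
    ((List.range k).foldl (pvAStep cs cs.length) ([], 0)).2
        + ((cs.take k).foldl pvBStep ([], [])).2.length = k := by
  induction k with
  | zero => simp
  | succ k ih =>
    have hk' : k ≤ cs.length - 1 := by omega
    have hkn : k < cs.length := by omega
    obtain ⟨h1, h2, h3⟩ := ih hk'
    set sA := (List.range k).foldl (pvAStep cs cs.length) ([], 0) with hsA
    set sB := (cs.take k).foldl pvBStep ([], []) with hsB
    have hrange : List.range (k + 1) = List.range k ++ [k] := List.range_succ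
    have htake : cs.take (k + 1) = cs.take k ++ [cs.getD k ' '] := by
      rw [List.take_add_one, List.getD_eq_getElem?_getD,
          List.getElem?_eq_getElem hkn]
      simp
    have hist : sA.2 ≤ k := by omega
    have hlen : (cs.take k).length = k := by simp; omega
    have hdropapp : (cs.take k ++ [cs.getD k ' ']).drop sA.2
        = (cs.take k).drop sA.2 ++ [cs.getD k ' '] := by
      rw [List.drop_append_of_le_length (by omega)]
    rw [hrange, List.foldl_append, htake, List.foldl_append, ← hsA, ← hsB]
    simp only [List.foldl_cons, List.foldl_nil]
    have hne : ¬ (k = cs.length - 1) := by omega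
    by_cases ha : PySem.Chars.isalpha (cs.getD k ' ') = true
    · -- alphabetic: A's state unchanged, B extends run
      have eA : pvAStep cs cs.length sA k = sA := by
        simp only [pvAStep, ha, Bool.not_true, Bool.false_eq_true, if_false, if_neg hne]
      have eB : pvBStep sB (cs.getD k ' ') = (sB.1, sB.2 ++ [cs.getD k ' ']) := by
        simp only [pvBStep, ha, if_true]
      rw [eA, eB]
      refine ⟨h1, ?_, ?_⟩
      · rw [hdropapp, ← h2]
      · simp; omega
    · -- non-alphabetic: A flushes the slice, B flushes the run
      have ha' : PySem.Chars.isalpha (cs.getD k ' ') = false := by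
        simp only [Bool.not_eq_true] at ha; exact ha
      have eA : pvAStep cs cs.length sA k
          = (sA.1 ++ [(PySem.List.slice cs (some (sA.2 : Int)) (some (k : Int))).reverse
              ++ [cs.getD k ' ']], k + 1) := by
        simp only [pvAStep, ha', Bool.not_false, if_true, if_neg hne]
      have eB : pvBStep sB (cs.getD k ' ')
          = (sB.1 ++ sB.2.reverse ++ [cs.getD k ' '], []) := by
        simp only [pvBStep, ha', Bool.false_eq_true, if_false]
      have hslice : PySem.List.slice cs (some (sA.2 : Int)) (some (k : Int)) = sB.2 := by
        rw [PySem.List.slice_natCast, h2, List.drop_take]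
      rw [eA, eB]
      refine ⟨?_, ?_, ?_⟩
      · rw [List.flatten_append, h1, hslice]; simp
      · simp [hlen]
      · simp

-- B's fold over an all-alphabetic list just appends it to the run
theorem pv_alpha_fold (cs : List Char) (h : ∀ c ∈ cs, PySem.Chars.isalpha c) :
    ∀ st : List Char × List Char, cs.foldl pvBStep st = (st.1, st.2 ++ cs) := by
  induction cs with
  | nil => intro st; simp
  | cons c cs ih =>
    intro st
    have hc : PySem.Chars.isalpha c := h c (List.mem_cons_self ..)
    rw [List.foldl_cons, ih (fun x hx => h x (List.mem_cons_of_mem _ hx))]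
    simp [pvBStep, hc]

-- A's loop = B's pass, for any character list (the non-fast-path computation)
theorem pv_main (cs : List Char) :
    (((List.range cs.length).foldl (pvAStep cs cs.length) ([], 0)).1.flatten : List Char)
      = (cs.foldl pvBStep ([], [])).1 ++ (cs.foldl pvBStep ([], [])).2.reverse := by
  rcases Nat.eq_zero_or_pos cs.length with h0 | hpos
  · have : cs = [] := List.length_eq_zero_iff.mp h0
    subst this; simp
  · set n := cs.length with hn
    obtain ⟨h1, h2, h3⟩ := pv_inv cs (n - 1) (le_refl _)
    set sA := (List.range (n - 1)).foldl (pvAStep cs n) ([], 0) with hsA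
    set sB := (cs.take (n - 1)).foldl pvBStep ([], []) with hsB
    have hone : n = (n - 1) + 1 := by omega
    have hrange : List.range n = List.range (n - 1) ++ [n - 1] := by
      conv_lhs => rw [hone]
      exact List.range_succ
    have hlast : n - 1 < cs.length := by omega
    have htake : cs = cs.take (n - 1) ++ [cs.getD (n - 1) ' '] := by
      conv_lhs => rw [← List.take_length (l := cs), ← hn, hone]
      rw [List.take_add_one, List.getD_eq_getElem?_getD,
          List.getElem?_eq_getElem hlast]
      simp
    have hfoldB : cs.foldl pvBStep ([], []) = pvBStep sB (cs.getD (n - 1) ' ') := by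
      conv_lhs => rw [htake]
      rw [List.foldl_append, ← hsB]
      simp
    have hlen : (cs.take (n - 1)).length = n - 1 := by rw [List.length_take]; omega
    have hist : sA.2 ≤ n - 1 := by omega
    have hdrop : cs.drop sA.2 = (cs.take (n - 1)).drop sA.2 ++ [cs.getD (n - 1) ' '] := by
      conv_lhs => rw [htake]
      rw [List.drop_append_of_le_length (by omega)]
    rw [hrange, List.foldl_append, ← hsA, hfoldB]
    simp only [List.foldl_cons, List.foldl_nil]
    by_cases ha : PySem.Chars.isalpha (cs.getD (n - 1) ' ') = true
    · have ha2 : PySem.Chars.isalpha (cs[n - 1]?.getD ' ') = true := by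
        simpa using ha
      have eA : pvAStep cs n sA (n - 1)
          = (sA.1 ++ [(PySem.List.slice cs (some (sA.2 : Int)) none).reverse], sA.2) := by
        simp [pvAStep, ha2]
      have eB : pvBStep sB (cs.getD (n - 1) ' ') = (sB.1, sB.2 ++ [cs.getD (n - 1) ' ']) := by
        simp [pvBStep, ha2]
      rw [eA, eB]
      rw [List.flatten_append, h1, PySem.List.slice_from_natCast, hdrop, ← h2]
      simp
    · have ha2 : PySem.Chars.isalpha (cs[n - 1]?.getD ' ') = false := by
        simpa using ha
      have eA : pvAStep cs n sA (n - 1)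
          = (sA.1 ++ [(PySem.List.slice cs (some (sA.2 : Int)) (some ((n - 1 : Nat) : Int))).reverse
                ++ [cs.getD (n - 1) ' ']]
              ++ [(PySem.List.slice cs (some ((n - 1 + 1 : Nat) : Int)) none).reverse], n - 1 + 1) := by
        simp [pvAStep, ha2]
      have eB : pvBStep sB (cs.getD (n - 1) ' ')
          = (sB.1 ++ sB.2.reverse ++ [cs.getD (n - 1) ' '], []) := by
        simp [pvBStep, ha2]
      have hslice : PySem.List.slice cs (some (sA.2 : Int)) (some ((n - 1 : Nat) : Int)) = sB.2 := by
        rw [PySem.List.slice_natCast, h2, List.drop_take]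
      have hnil : PySem.List.slice cs (some ((n - 1 + 1 : Nat) : Int)) none = [] := by
        rw [PySem.List.slice_from_natCast]
        apply List.drop_eq_nil_of_le; omega
      rw [eA, eB, hnil, hslice]
      rw [List.flatten_append, List.flatten_append, h1]
      simp

-- ===== VERDICT (by name: the statement is the Claim_ definition above) =====
theorem reverse_and_output_word_spec : Claim_equal_reverse_and_output_word := by
  intro word _
  unfold Spec_reverse_and_output_word
  have hA : reverse_and_output_word word
      = (if PySem.Str.strIsalpha word then String.ofList word.toList.reverse
         else String.ofList
           (((List.range word.toList.length).foldl
               (pvAStep word.toList word.toList.length) ([], 0)).1.flatten)) := rfl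
  have hB : reverse_and_output_word_alt word
      = String.ofList ((word.toList.foldl pvBStep ([], [])).1
          ++ (word.toList.foldl pvBStep ([], [])).2.reverse) := rfl
  rw [hA, hB]
  by_cases h : PySem.Str.strIsalpha word = true
  · rw [if_pos h]
    have h' : PySem.Chars.strIsalpha word.toList = true := by
      simpa [PySem.Str.strIsalpha] using h
    have hall : ∀ c ∈ word.toList, PySem.Chars.isalpha c := by
      intro c hc
      have := (Bool.and_eq_true ..).mp h'
      exact List.all_eq_true.mp this.2 c hc
    rw [pv_alpha_fold word.toList hall ([], [])]
    simp
  · rw [if_neg h]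
    rw [pv_main word.toList]
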